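-- pv_equiv track=rewrite | github.com/Commons-POTY/poty-scripts | poty/utils/misc.py | get_tops
-- ===== SOURCE A (Python) =====
-- import collections
--
-- def get_tops(dct, num=-1):
--     num = -1 if num is None else num
--     dct = collections.OrderedDict(
--         sorted(dct.items(), key=lambda i: i[1], reverse=True))
--     last_i = 0
--     last_v = None
--     for i, (key, val) in enumerate(dct.items(), 1):
--         if val != last_v:
--             last_v = val
--             last_i = i
--
--         if num >= 0 and last_i > num:
--             break
--
--         yield last_i, key
-- ===== SOURCE B (Python) =====
-- import collections
--
--
-- def get_tops(dct, num=-1):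
--     # Two-pass re-implementation: sort once, build a value -> first-rank table,
--     # then emit (rank, key) pairs until a rank exceeds num.
--     num = -1 if num is None else num
--     items = sorted(dct.items(), key=lambda i: i[1], reverse=True)
--     first_idx = {}
--     for i, (key, val) in enumerate(items, 1):
--         first_idx.setdefault(val, i)
--     for key, val in items:
--         r = first_idx[val]
--         if num >= 0 and r > num:
--             break
--         yield r, key
-- ===== Notes on version B (the rewrite author's own statement) =====
-- stated objective: alternative
-- what changed: Replaces A's single stateful scan (tracking last value and last rank with an in-loop tie update) by a two-pass decomposition: sort once, build a value-to-first-rank dictionary, then map each sorted item through the table and cut when the rank exceeds num.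
import Mathlib
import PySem

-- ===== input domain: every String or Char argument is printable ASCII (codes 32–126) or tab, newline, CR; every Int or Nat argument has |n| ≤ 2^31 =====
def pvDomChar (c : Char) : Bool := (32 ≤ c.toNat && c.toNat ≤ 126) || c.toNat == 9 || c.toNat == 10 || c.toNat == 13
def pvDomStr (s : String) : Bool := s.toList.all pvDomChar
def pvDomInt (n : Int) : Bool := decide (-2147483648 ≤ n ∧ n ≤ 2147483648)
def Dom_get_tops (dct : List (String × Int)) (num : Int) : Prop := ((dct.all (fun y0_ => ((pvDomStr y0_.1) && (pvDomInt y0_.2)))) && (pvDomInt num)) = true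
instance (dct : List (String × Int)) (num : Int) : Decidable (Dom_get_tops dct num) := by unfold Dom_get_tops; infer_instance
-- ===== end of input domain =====

-- B changes the decomposition (rank table + map/cut instead of one stateful scan); same cost, no speed claim.

-- ===== PORT A =====
-- the 'for i, (key, val) in enumerate(dct.items(), 1): …' loop, with break
def aLoop (num : Int) : List (String × Int) → Int → Int → Option Int → List (Int × String)
  | [], _, _, _ => []
  | (key, val) :: rest, i, last_i, last_v =>
    let st := if some val ≠ last_v then (i, some val) else (last_i, last_v)
    if num ≥ 0 ∧ st.1 > num then []
    else (st.1, key) :: aLoop num rest (i + 1) st.1 st.2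

def get_tops (dct : List (String × Int)) (num : Int) : List (Int × String) :=
  let items := PySem.List.sorted dct (fun i => i.2) true
  aLoop num items 1 0 none

-- ===== PORT B =====
-- first pass: first_idx.setdefault(val, i) over enumerate(items, 1)
def bRank : List (String × Int) → Int → PySem.Dict Int Int → PySem.Dict Int Int
  | [], _, d => d
  | (_, val) :: rest, i, d => bRank rest (i + 1) (d.setdefault val i)

-- second pass: emit (first_idx[val], key) until the rank exceeds num
def bEmit (num : Int) : List (Int × String) → List (Int × String)
  | [] => []
  | (r, key) :: rest => if num ≥ 0 ∧ r > num then [] else (r, key) :: bEmit num rest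

def get_tops_alt (dct : List (String × Int)) (num : Int) : List (Int × String) :=
  let items := PySem.List.sorted dct (fun i => i.2) true
  let first_idx := bRank items 1 PySem.Dict.empty
  -- first_idx[val] : the key is always present (the table was built from the same items)
  bEmit num (items.map (fun x => (((first_idx.get? x.2).getD 0), x.1)))

-- ===== PRECONDITION & SPEC =====
def Spec_get_tops (dct : List (String × Int)) (num : Int) (out : List (Int × String)) : Prop := out = get_tops_alt dct num
instance (dct : List (String × Int)) (num : Int) (out : List (Int × String)) : Decidable (Spec_get_tops dct num out) := by unfold Spec_get_tops; infer_instance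

-- ===== CLAIM (what is proved, stated in full; the proofs are below) =====
def Claim_equal_get_tops : Prop := ∀ (dct : List (String × Int)) (num : Int), Dom_get_tops dct num → Spec_get_tops dct num (get_tops dct num)

-- ===== LEMMAS AND PROOFS =====

-- characterisation of the rank table: lookup = first index (1-based, offset i) among keys not yet in d
lemma bRank_get? (v : Int) : ∀ (t : List (String × Int)) (i : Int) (d : PySem.Dict Int Int),
    (bRank t i d).get? v =
      ((d.get? v).or ((t.findIdx? (fun x => x.2 == v)).map (fun j => i + (j : Int)))) := by
  intro t
  induction t with
  | nil => intro i d; simp [bRank]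
  | cons hd tl ih =>
    intro i d
    obtain ⟨k, w⟩ := hd
    simp only [bRank]
    rw [ih]
    by_cases hv : v = w
    · subst hv
      rw [PySem.Dict.get?_setdefault_self]
      simp only [List.findIdx?_cons, beq_self_eq_true, if_pos]
      cases d.get? v <;> simp [Option.or]
    · have hget : (d.setdefault w i).get? v = d.get? v := by
        rw [PySem.Dict.get?_setdefault_of_ne]; exact hv
      rw [hget]
      have hw : ((w == v) = false) := by simp [Ne.symm hv]
      simp only [List.findIdx?_cons, hw, if_neg Bool.false_ne_true]
      cases d.get? v <;> cases tl.findIdx? (fun x => x.2 == v) <;>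
        simp [Option.or] <;> ring
  
lemma findIdx_first (v : Int) : ∀ (p : List (String × Int)) (k : String) (t' : List (String × Int)),
    (∀ x ∈ p, x.2 ≠ v) →
    List.findIdx? (fun x => x.2 == v) (p ++ (k, v) :: t') = some p.length := by
  intro p
  induction p with
  | nil => intro k t' _; simp [List.findIdx?_cons]
  | cons x q ih =>
    intro k t' h
    have hx : ((x.2 == v) = false) := by simp [h x (by simp)]
    have := ih k t' (fun y hy => h y (by simp [hy]))
    simp [List.findIdx?_cons, hx, this]

lemma last_le_of_pairwise : ∀ (p : List (String × Int)) (h : p ≠ []),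
    p.Pairwise (fun a b => b.2 ≤ a.2) → ∀ x ∈ p, (p.getLast h).2 ≤ x.2 := by
  intro p
  induction p with
  | nil => intro h; exact absurd rfl h
  | cons a q ih =>
    intro h hp x hx
    rcases List.pairwise_cons.mp hp with ⟨ha, hq⟩
    by_cases hqe : q = []
    · subst hqe
      simp only [List.mem_singleton] at hx
      subst hx
      simp [List.getLast]
    · rw [List.getLast_cons hqe]
      rcases List.mem_cons.mp hx with rfl | hxq
      · exact ha _ (List.getLast_mem hqe)
      · exact ih hqe hq x hxq

-- main loop correspondence
lemma loop_eq (num : Int) (s : List (String × Int))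
    (hs : s.Pairwise (fun a b => b.2 ≤ a.2)) :
    ∀ (t p : List (String × Int)) (last_i : Int) (last_v : Option Int),
      s = p ++ t →
      ((p = [] ∧ last_i = 0 ∧ last_v = none) ∨
       (∃ (h : p ≠ []), last_v = some (p.getLast h).2 ∧
          last_i = ((bRank s 1 PySem.Dict.empty).get? (p.getLast h).2).getD 0)) →
      aLoop num t ((p.length : Int) + 1) last_i last_v =
        bEmit num (t.map (fun x => (((bRank s 1 PySem.Dict.empty).get? x.2).getD 0, x.1))) := by
  intro t
  induction t with
  | nil => intro p last_i last_v _ _; simp [aLoop, bEmit]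
  | cons hd t' ih =>
    intro p last_i last_v hst hinv
    obtain ⟨k, v⟩ := hd
    -- decompose the sortedness of s = p ++ (k,v) :: t'
    rw [hst] at hs
    rcases List.pairwise_append.mp hs with ⟨hp, hrest, hrel⟩
    rw [← hst] at hs
    -- the value the rank table assigns to v
    set R : Int := ((bRank s 1 PySem.Dict.empty).get? v).getD 0 with hR
    have hkey : (if some v ≠ last_v then ((p.length : Int) + 1, some v) else (last_i, last_v)).1 = R ∧
        (if some v ≠ last_v then ((p.length : Int) + 1, some v) else (last_i, last_v)).2 = some v := by
      by_cases hne : some v ≠ last_v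
      · rw [if_pos hne]
        refine ⟨?_, rfl⟩
        -- v does not occur among the values of p
        have hnotin : ∀ x ∈ p, x.2 ≠ v := by
          intro x hx hxv
          rcases hinv with ⟨hpe, _, _⟩ | ⟨hpne, hlv, _⟩
          · subst hpe; simp at hx
          · have h1 : v ≤ (p.getLast hpne).2 :=
              hrel _ (List.getLast_mem hpne) (k, v) (by simp)
            have h2 : (p.getLast hpne).2 ≤ x.2 := last_le_of_pairwise p hpne hp x hx
            rw [hxv] at h2
            have : (p.getLast hpne).2 = v := le_antisymm h2 h1
            exact hne (by rw [hlv, this])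
        have hfind : List.findIdx? (fun x => x.2 == v) s = some p.length := by
          rw [hst]; exact findIdx_first v p k t' hnotin
        rw [hR, bRank_get? v s 1 PySem.Dict.empty, hfind]
        simp [PySem.Dict.get?_empty, Option.or]
        ring
      · rw [if_neg hne]
        have hne : some v = last_v := not_ne_iff.mp hne
        rcases hinv with ⟨_, _, hlv⟩ | ⟨hpne, hlv, hli⟩
        · rw [hlv] at hne; exact absurd hne (by simp)
        · have hv : (p.getLast hpne).2 = v := by
            rw [hlv] at hne
            exact (Option.some_injective _ hne.symm)
          exact ⟨by rw [hli, hv], by rw [hlv, hv]⟩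
    -- unfold one step of both loops
    have hlast : ∀ (h : p ++ [(k, v)] ≠ []), (p ++ [(k, v)]).getLast h = (k, v) := by
      intro h
      rw [List.getLast_append]; simp
    have hIH := ih (p ++ [(k, v)]) R (some v)
      (by rw [hst, List.append_assoc]; rfl)
      (Or.inr ⟨by simp, by rw [hlast], by rw [hlast]⟩)
    simp only [aLoop, bEmit, List.map_cons, hkey.1, hkey.2, ← hR]
    by_cases hbrk : num ≥ 0 ∧ R > num
    · simp only [if_pos hbrk]
    · simp only [if_neg hbrk]
      refine congrArg _ ?_
      have harith : ((p ++ [(k, v)]).length : Int) + 1 = (p.length : Int) + 1 + 1 := by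
        simp
      rw [← harith]
      exact hIH

-- ===== VERDICT (by name: the statement is the Claim_ definition above) =====
theorem get_tops_spec : Claim_equal_get_tops := by
  intro dct num _
  unfold Spec_get_tops get_tops get_tops_alt
  have hs : (PySem.List.sorted dct (fun i => i.2) true).Pairwise (fun a b => b.2 ≤ a.2) :=
    PySem.List.sorted_pairwise_rev dct (fun i => i.2)
  have := loop_eq num (PySem.List.sorted dct (fun i => i.2) true) hs
    (PySem.List.sorted dct (fun i => i.2) true) [] 0 none rfl (Or.inl ⟨rfl, rfl, rfl⟩)
  simpa using this
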